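-- pv_equiv track=rewrite | github.com/silanm/nlp-a1-similar-context | Merged.py | build_skipgrams
-- ===== SOURCE A (Python) =====
-- def build_skipgrams(corpus, word2index, window_size=2):
--     skip_grams = []
--     for sentence in corpus:
--         for idx, word in enumerate(sentence):
--             center = word2index.get(word, word2index["<UNKNOWN>"])
--             context_window = sentence[max(0, idx - window_size) : idx] + sentence[idx + 1 : idx + window_size + 1]
--             for context_word in context_window:
--                 context = word2index.get(context_word, word2index["<UNKNOWN>"])
--                 skip_grams.append((center, context))
--     return skip_grams
-- ===== SOURCE B (Python) =====
-- def build_skipgrams(corpus, word2index, window_size=2):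
--     # Generate-and-filter: enumerate all ordered position pairs (i, j) of each
--     # sentence and keep those within the window, instead of slicing context lists.
--     return [
--         (word2index.get(s[i], word2index["<UNKNOWN>"]),
--          word2index.get(s[j], word2index["<UNKNOWN>"]))
--         for s in corpus
--         for i in range(len(s))
--         for j in range(len(s))
--         if j != i and abs(i - j) <= window_size
--     ]
-- ===== Notes on version B (the rewrite author's own statement) =====
-- stated objective: alternative
-- what changed: B is a generate-and-filter comprehension: it enumerates all ordered position pairs (i, j) of each sentence and keeps those with j != i and abs(i - j) <= window_size, instead of A's per-center list slicing of context windows.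
-- intended difference: For window_size <= -2 and a sentence longer than -window_size, A's slice stop idx+window_size+1 goes negative and wraps around to the end of the sentence, so A returns spurious (center, context) pairs; B returns no pairs there (empty output), the intended empty context window for a non-positive window. — e.g. on build_skipgrams([["a", "b", "c"]], ([("a", 1), ("b", 2), ("c", 3), ("<UNKNOWN>", 0)], -2)): A returns [(1, 2)], B returns []
import Mathlib
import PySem

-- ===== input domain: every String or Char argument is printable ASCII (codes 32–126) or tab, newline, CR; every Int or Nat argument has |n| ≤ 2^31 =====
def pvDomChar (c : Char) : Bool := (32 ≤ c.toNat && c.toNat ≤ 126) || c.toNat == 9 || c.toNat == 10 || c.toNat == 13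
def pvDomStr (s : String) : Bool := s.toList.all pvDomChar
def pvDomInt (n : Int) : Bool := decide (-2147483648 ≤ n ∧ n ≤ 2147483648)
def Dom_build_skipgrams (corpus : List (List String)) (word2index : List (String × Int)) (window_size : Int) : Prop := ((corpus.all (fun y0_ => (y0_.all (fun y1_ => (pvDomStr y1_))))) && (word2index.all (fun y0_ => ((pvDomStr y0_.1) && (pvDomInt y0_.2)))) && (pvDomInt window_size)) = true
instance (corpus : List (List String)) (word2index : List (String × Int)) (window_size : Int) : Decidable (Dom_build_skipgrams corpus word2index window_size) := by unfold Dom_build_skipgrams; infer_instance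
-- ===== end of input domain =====

-- B generates all ordered position pairs of each sentence and filters them by window distance,
-- instead of A's per-center list-slice context windows; equivalence of the return value.

-- ===== PORT A =====
-- word2index.get(w, word2index["<UNKNOWN>"]): first-match association-list lookup with the
-- "<UNKNOWN>" entry as default; Pre_ guarantees that entry exists whenever the default is needed
-- (the .getD 0 only totalizes the KeyError case Pre_ excludes). The same expression occurs in both
-- Pythons, so both ports share this helper.
def pvLookup (word2index : List (String × Int)) (w : String) : Int :=
  match word2index.find? (fun p => p.1 == w) with
  | some p => p.2
  | none => ((word2index.find? (fun p => p.1 == "<UNKNOWN>")).map (·.2)).getD 0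

def build_skipgrams (corpus : List (List String)) (word2index : List (String × Int)) (window_size : Int) : List (Int × Int) :=
  corpus.foldl (fun acc sentence =>
    (PySem.List.enumerate sentence).foldl (fun acc2 p =>
      let center := pvLookup word2index p.2
      let context_window :=
        PySem.List.slice sentence (some (max 0 (p.1 - window_size))) (some p.1)
          ++ PySem.List.slice sentence (some (p.1 + 1)) (some (p.1 + window_size + 1))
      context_window.foldl (fun acc3 c => acc3 ++ [(center, pvLookup word2index c)]) acc2) acc) []

-- ===== PORT B =====
-- Literal transliteration of Source B's comprehension: flatMap over sentences, flatMap over i,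
-- filter over j, then the pair of lookups (s[i] / s[j] are in range, pyGetD totalizes).
def build_skipgrams_alt (corpus : List (List String)) (word2index : List (String × Int)) (window_size : Int) : List (Int × Int) :=
  corpus.flatMap (fun s =>
    (PySem.List.pyRange 0 (s.length : Int) 1).flatMap (fun i =>
      ((PySem.List.pyRange 0 (s.length : Int) 1).filter
          (fun j => j != i && decide (|i - j| ≤ window_size))).map
        (fun j => (pvLookup word2index (PySem.List.pyGetD s i ""),
                   pvLookup word2index (PySem.List.pyGetD s j "")))))

-- ===== PRECONDITION & SPEC =====
-- Pre_ excludes exactly the inputs on which A (and B) raises KeyError: a corpus with a nonempty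
-- sentence while "<UNKNOWN>" is not a key of word2index (the .get default is evaluated eagerly per word).
def Pre_build_skipgrams (corpus : List (List String)) (word2index : List (String × Int)) (window_size : Int) : Prop :=
  (word2index.any (fun p => p.1 == "<UNKNOWN>") || corpus.all (fun s => s.isEmpty)) = true
instance (corpus : List (List String)) (word2index : List (String × Int)) (window_size : Int) : Decidable (Pre_build_skipgrams corpus word2index window_size) := by unfold Pre_build_skipgrams; infer_instance

def pvWitness_build_skipgrams : List (List String) × (List (String × Int)) × Int :=
  ([["a", "b"]], ([("a", 0), ("b", 1), ("<UNKNOWN>", 2)], 2))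

-- For window_size ≤ -2 and some sentence longer than -window_size, A's slice stop idx+window_size+1
-- goes negative and wraps around to the end of the sentence, so A returns spurious (center, context)
-- pairs; B returns no pairs there ([]), the intended empty context window for a non-positive window.
def D_build_skipgrams (corpus : List (List String)) (word2index : List (String × Int)) (window_size : Int) : Prop :=
  window_size ≤ -2 ∧ ∃ s ∈ corpus, -window_size < (s.length : Int)
instance (corpus : List (List String)) (word2index : List (String × Int)) (window_size : Int) : Decidable (D_build_skipgrams corpus word2index window_size) := by unfold D_build_skipgrams; infer_instance

def Spec_build_skipgrams (corpus : List (List String)) (word2index : List (String × Int)) (window_size : Int) (out : List (Int × Int)) : Prop :=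
  ¬ D_build_skipgrams corpus word2index window_size → out = build_skipgrams_alt corpus word2index window_size
instance (corpus : List (List String)) (word2index : List (String × Int)) (window_size : Int) (out : List (Int × Int)) : Decidable (Spec_build_skipgrams corpus word2index window_size out) := by unfold Spec_build_skipgrams; infer_instance

def pvDiffWitness_build_skipgrams : List (List String) × (List (String × Int)) × Int :=
  ([["a", "b", "c"]], ([("a", 1), ("b", 2), ("c", 3), ("<UNKNOWN>", 0)], -2))
def pvDiffWitnessOut_build_skipgrams : (List (Int × Int)) × (List (Int × Int)) := ([(1, 2)], [])

-- ===== CLAIM (what is proved, stated in full; the proofs are below) =====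
def Claim_unchanged_build_skipgrams : Prop := ∀ (corpus : List (List String)) (word2index : List (String × Int)) (window_size : Int), Dom_build_skipgrams corpus word2index window_size → Pre_build_skipgrams corpus word2index window_size → Spec_build_skipgrams corpus word2index window_size (build_skipgrams corpus word2index window_size)
def Claim_changed_build_skipgrams : Prop := Dom_build_skipgrams (pvDiffWitness_build_skipgrams.1) (pvDiffWitness_build_skipgrams.2.1) (pvDiffWitness_build_skipgrams.2.2) ∧ Pre_build_skipgrams (pvDiffWitness_build_skipgrams.1) (pvDiffWitness_build_skipgrams.2.1) (pvDiffWitness_build_skipgrams.2.2) ∧ D_build_skipgrams (pvDiffWitness_build_skipgrams.1) (pvDiffWitness_build_skipgrams.2.1) (pvDiffWitness_build_skipgrams.2.2) ∧ build_skipgrams (pvDiffWitness_build_skipgrams.1) (pvDiffWitness_build_skipgrams.2.1) (pvDiffWitness_build_skipgrams.2.2) = pvDiffWitnessOut_build_skipgrams.1 ∧ build_skipgrams_alt (pvDiffWitness_build_skipgrams.1) (pvDiffWitness_build_skipgrams.2.1) (pvDiffWitness_build_skipgrams.2.2) = pvDiffWitnessOut_build_skipgrams.2 ∧ pvDiffWitnessOut_build_skipgrams.1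 ≠ pvDiffWitnessOut_build_skipgrams.2
def Claim_exact_build_skipgrams : Prop := ∀ (corpus : List (List String)) (word2index : List (String × Int)) (window_size : Int), Dom_build_skipgrams corpus word2index window_size → Pre_build_skipgrams corpus word2index window_size → D_build_skipgrams corpus word2index window_size → build_skipgrams corpus word2index window_size ≠ build_skipgrams_alt corpus word2index window_size

-- ===== LEMMAS AND PROOFS =====

-- per-sentence contribution of A, as a flatMap
def pvGA (word2index : List (String × Int)) (ws : Int) (s : List String) : List (Int × Int) :=
  (PySem.List.enumerate s).flatMap (fun p =>
    (PySem.List.slice s (some (max 0 (p.1 - ws))) (some p.1)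
      ++ PySem.List.slice s (some (p.1 + 1)) (some (p.1 + ws + 1))).map
      (fun c => (pvLookup word2index p.2, pvLookup word2index c)))

-- per-sentence contribution of B (the inner body of build_skipgrams_alt)
def pvGB (word2index : List (String × Int)) (ws : Int) (s : List String) : List (Int × Int) :=
  (PySem.List.pyRange 0 (s.length : Int) 1).flatMap (fun i =>
    ((PySem.List.pyRange 0 (s.length : Int) 1).filter
        (fun j => j != i && decide (|i - j| ≤ ws))).map
      (fun j => (pvLookup word2index (PySem.List.pyGetD s i ""),
                 pvLookup word2index (PySem.List.pyGetD s j ""))))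

theorem pvA_eq_flatMap (corpus : List (List String)) (w2i : List (String × Int)) (ws : Int) :
    build_skipgrams corpus w2i ws = corpus.flatMap (pvGA w2i ws) := by
  simp only [build_skipgrams, PySem.List.foldl_append_singleton_eq_map,
    PySem.List.foldl_append_eq_flatMap]
  rfl

theorem pvB_eq_flatMap (corpus : List (List String)) (w2i : List (String × Int)) (ws : Int) :
    build_skipgrams_alt corpus w2i ws = corpus.flatMap (pvGB w2i ws) := rfl

-- slice with nonnegative in-range bounds is a map of lookups over the index range
theorem pvSlice_eq_map_range {α : Type} (d : α) (xs : List α) (a b : Int)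
    (ha : 0 ≤ a) (hb : 0 ≤ b) (hbn : b ≤ xs.length) :
    PySem.List.slice xs (some a) (some b)
      = (PySem.List.pyRange a b 1).map (fun j => PySem.List.pyGetD xs j d) := by
  rw [PySem.List.slice_toNat (xs := xs) ha hb]
  apply List.ext_getElem
  · simp [PySem.List.length_pyRange_one]
    omega
  · intro k h1 h2
    have h2' : k < (b - a).toNat := by
      simpa [PySem.List.length_pyRange_one] using h2
    simp only [List.getElem_take, List.getElem_drop, List.getElem_map,
      PySem.List.getElem_pyRange_one]
    rw [PySem.List.pyGetD_eq_getElem]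
    · congr 1
      omega
    · omega
    · omega

-- clamping a nonnegative stop bound at the length changes nothing
theorem pvSlice_clamp {α : Type} (xs : List α) (a b : Int) (ha : 0 ≤ a) (hb : 0 ≤ b) :
    PySem.List.slice xs (some a) (some b)
      = PySem.List.slice xs (some a) (some (min b xs.length)) := by
  rw [PySem.List.slice_toNat (xs := xs) ha hb,
      PySem.List.slice_toNat (xs := xs) ha (by positivity)]
  rcases le_or_gt b xs.length with h | h
  · congr 1; omega
  · have h1 : (min b (xs.length : Int)).toNat = xs.length := by omega
    rw [h1]
    have hlen : (List.drop a.toNat xs).length ≤ xs.length - a.toNat := by simp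
    rw [List.take_of_length_le (by omega), List.take_of_length_le (by omega)]

-- a slice with start ≥ stop ≥ 0 is empty
theorem pvSlice_nil {α : Type} (xs : List α) (a b : Int) (hb : 0 ≤ b) (hba : b ≤ a) :
    PySem.List.slice xs (some a) (some b) = [] := by
  rw [PySem.List.slice_toNat (xs := xs) (by omega) hb]
  have : b.toNat - a.toNat = 0 := by omega
  simp [this]

-- a slice whose negative stop wraps to at most the (nonnegative) start is empty
theorem pvSlice_nil_negstop {α : Type} (xs : List α) (a b : Int) (ha : 0 ≤ a)
    (hb : b < 0) (hw : (xs.length : Int) + b ≤ a) :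
    PySem.List.slice xs (some a) (some b) = [] := by
  apply List.eq_nil_of_length_eq_zero
  rw [PySem.List.length_slice]
  simp only [PySem.List.clampIdx, if_pos hb, if_neg (not_lt.mpr ha)]
  split <;> omega

-- with a negative window the distance filter rejects every j
theorem pvFilter_nil (n i ws : Int) (hws : ws < 0) :
    (PySem.List.pyRange 0 n 1).filter (fun j => j != i && decide (|i - j| ≤ ws)) = [] := by
  rw [List.filter_eq_nil_iff]
  intro j _
  simp only [bne_iff_ne, Bool.and_eq_true, decide_eq_true_eq, not_and, ne_eq]
  intro _ h
  have := abs_nonneg (i - j)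
  omega

-- with a nonnegative window the distance filter keeps exactly the left then the right window
theorem pvFilter_window (n i ws : Int) (h0 : 0 ≤ i) (hn : i < n) (hws : 0 ≤ ws) :
    (PySem.List.pyRange 0 n 1).filter (fun j => j != i && decide (|i - j| ≤ ws))
      = PySem.List.pyRange (max 0 (i - ws)) i 1
        ++ PySem.List.pyRange (i + 1) (min n (i + ws + 1)) 1 := by
  rw [PySem.List.pyRange_one_append 0 (max 0 (i - ws)) n (by omega) (by omega),
      PySem.List.pyRange_one_append (max 0 (i - ws)) i n (by omega) (by omega),
      PySem.List.pyRange_one_append i (i + 1) n (by omega) (by omega),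
      PySem.List.pyRange_one_append (i + 1) (min n (i + ws + 1)) n (by omega) (by omega),
      PySem.List.pyRange_one_singleton]
  simp only [List.filter_append]
  have e1 : (PySem.List.pyRange 0 (max 0 (i - ws)) 1).filter
      (fun j => j != i && decide (|i - j| ≤ ws)) = [] := by
    rw [List.filter_eq_nil_iff]
    intro j hj
    obtain ⟨hj0, hj1⟩ := PySem.List.mem_pyRange_one.mp hj
    simp only [bne_iff_ne, Bool.and_eq_true, decide_eq_true_eq, not_and, ne_eq, abs_le]
    omega
  have e2 : (PySem.List.pyRange (max 0 (i - ws)) i 1).filter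
      (fun j => j != i && decide (|i - j| ≤ ws))
      = PySem.List.pyRange (max 0 (i - ws)) i 1 := by
    rw [List.filter_eq_self]
    intro j hj
    obtain ⟨hj0, hj1⟩ := PySem.List.mem_pyRange_one.mp hj
    simp only [bne_iff_ne, Bool.and_eq_true, decide_eq_true_eq, ne_eq, abs_le]
    omega
  have e3 : List.filter (fun j => j != i && decide (|i - j| ≤ ws)) [i] = [] := by
    simp
  have e4 : (PySem.List.pyRange (i + 1) (min n (i + ws + 1)) 1).filter
      (fun j => j != i && decide (|i - j| ≤ ws))
      = PySem.List.pyRange (i + 1) (min n (i + ws + 1)) 1 := by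
    rw [List.filter_eq_self]
    intro j hj
    obtain ⟨hj0, hj1⟩ := PySem.List.mem_pyRange_one.mp hj
    simp only [bne_iff_ne, Bool.and_eq_true, decide_eq_true_eq, ne_eq, abs_le]
    omega
  have e5 : (PySem.List.pyRange (min n (i + ws + 1)) n 1).filter
      (fun j => j != i && decide (|i - j| ≤ ws)) = [] := by
    rw [List.filter_eq_nil_iff]
    intro j hj
    obtain ⟨hj0, hj1⟩ := PySem.List.mem_pyRange_one.mp hj
    simp only [bne_iff_ne, Bool.and_eq_true, decide_eq_true_eq, not_and, ne_eq, abs_le]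
    omega
  rw [e1, e2, e3, e4, e5]
  simp

-- a flatMap over enumerate is a flatMap over the index range
theorem pvEnum_flatMap_aux {α β : Type} (d : α) (F : Int × α → List β) :
    ∀ (xs : List α) (k : Int),
    (PySem.List.enumerate xs k).flatMap F
      = (PySem.List.pyRange k (k + xs.length) 1).flatMap
          (fun i => F (i, PySem.List.pyGetD xs (i - k) d)) := by
  intro xs
  induction xs with
  | nil => intro k; simp [PySem.List.pyRange_one_eq_nil, PySem.List.enumerate]
  | cons x t ih =>
    intro k
    rw [PySem.List.enumerate_cons,
      PySem.List.pyRange_one_cons (by simp only [List.length_cons]; push_cast; omega)]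
    simp only [List.flatMap_cons]
    congr 1
    · simp [PySem.List.pyGetD_zero_cons]
    · rw [ih (k + 1)]
      have harr : (k + 1) + (t.length : Int) = k + ((x :: t).length : Int) := by
        simp only [List.length_cons]; push_cast; omega
      rw [harr]
      apply List.flatMap_congr
      intro i hi
      have hik : k + 1 ≤ i := (PySem.List.mem_pyRange_one.mp hi).1
      congr 1
      have h2 : i - k = (i - (k + 1)) + 1 := by omega
      obtain ⟨m, hm⟩ : ∃ m : Nat, i - (k + 1) = (m : Int) := ⟨(i - (k + 1)).toNat, by omega⟩
      have h4 : ((m : Int) + 1) = (((m + 1 : Nat)) : Int) := by push_cast; ring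
      rw [h2, hm, h4, PySem.List.pyGetD_natCast, PySem.List.pyGetD_natCast]
      simp [List.getD]

-- the per-sentence lists agree unless the wraparound region is reached
theorem pvGA_eq_pvGB (w2i : List (String × Int)) (ws : Int) (s : List String)
    (h : -1 ≤ ws ∨ (s.length : Int) ≤ -ws) : pvGA w2i ws s = pvGB w2i ws s := by
  unfold pvGA pvGB
  rw [pvEnum_flatMap_aux ""]
  simp only [zero_add, sub_zero]
  apply List.flatMap_congr
  intro i hi
  obtain ⟨hi0, hin⟩ := PySem.List.mem_pyRange_one.mp hi
  by_cases hws : 0 ≤ ws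
  · rw [pvFilter_window (s.length : Int) i ws hi0 hin hws,
        pvSlice_clamp s (i + 1) (i + ws + 1) (by omega) (by omega),
        pvSlice_eq_map_range "" s (max 0 (i - ws)) i (le_max_left 0 _) hi0 (by omega),
        pvSlice_eq_map_range "" s (i + 1) (min (i + ws + 1) (s.length : Int)) (by omega)
          (by omega) (min_le_right _ _),
        min_comm (i + ws + 1) ((s.length : Int))]
    simp [List.map_append, List.map_map, Function.comp_def]
  · rw [pvFilter_nil (s.length : Int) i ws (by omega),
        pvSlice_nil s (max 0 (i - ws)) i hi0 (by omega)]
    have hR : PySem.List.slice s (some (i + 1)) (some (i + ws + 1)) = [] := by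
      by_cases hb : 0 ≤ i + ws + 1
      · exact pvSlice_nil s (i + 1) (i + ws + 1) hb (by omega)
      · have hn : (s.length : Int) ≤ -ws := by
          rcases h with h | h
          · omega
          · exact h
        exact pvSlice_nil_negstop s (i + 1) (i + ws + 1) (by omega) (by omega) (by omega)
    rw [hR]
    simp

-- with a negative window B emits nothing at all
theorem pvB_nil_of_neg (corpus : List (List String)) (w2i : List (String × Int)) (ws : Int)
    (hws : ws < 0) : build_skipgrams_alt corpus w2i ws = [] := by
  rw [pvB_eq_flatMap, List.flatMap_eq_nil_iff]
  intro s _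
  unfold pvGB
  rw [List.flatMap_eq_nil_iff]
  intro i _
  rw [pvFilter_nil (s.length : Int) i ws hws]
  simp

-- on a long enough sentence with window ≤ -2, A's wraparound slice is nonempty
theorem pvGA_ne_nil (w2i : List (String × Int)) (ws : Int) (s : List String)
    (hws : ws ≤ -2) (hlen : -ws < (s.length : Int)) : pvGA w2i ws s ≠ [] := by
  match s with
  | [] => simp at hlen; omega
  | x :: t =>
    unfold pvGA
    rw [PySem.List.enumerate_cons]
    simp only [List.flatMap_cons]
    apply List.append_ne_nil_of_left_ne_nil
    simp only [ne_eq, List.map_eq_nil_iff]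
    apply List.append_ne_nil_of_right_ne_nil
    apply List.ne_nil_of_length_pos
    rw [PySem.List.length_slice]
    simp only [PySem.List.clampIdx, List.length_cons]
    simp only [List.length_cons] at hlen
    split_ifs <;> omega

-- ===== VERDICT (by name: the statement is the Claim_ definition above) =====
theorem build_skipgrams_spec : Claim_unchanged_build_skipgrams := by
  intro corpus w2i ws _ _
  intro hnD
  rw [pvA_eq_flatMap, pvB_eq_flatMap]
  apply List.flatMap_congr
  intro s hs
  apply pvGA_eq_pvGB
  by_cases hws : -1 ≤ ws
  · exact Or.inl hws
  · right
    unfold D_build_skipgrams at hnD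
    push Not at hnD
    exact hnD (by omega) s hs

theorem build_skipgrams_changed : Claim_changed_build_skipgrams := by
  unfold Claim_changed_build_skipgrams; decide

theorem build_skipgrams_tight : Claim_exact_build_skipgrams := by
  intro corpus w2i ws _ _ hD
  obtain ⟨hws, s, hs, hlen⟩ := hD
  rw [pvB_nil_of_neg corpus w2i ws (by omega), pvA_eq_flatMap]
  intro heq
  rw [List.flatMap_eq_nil_iff] at heq
  exact pvGA_ne_nil w2i ws s hws hlen (heq s hs)
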